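-- pv_equiv track=rewrite | github.com/iamagenius00/wakeup | __init__.py | _summarize_inbox_section
-- ===== SOURCE A (Python) =====
-- def _summarize_inbox_section(body: str) -> str:
--     """
--     Keep the ## date header line, then for each ### subheading keep the
--     subheading line plus the first non-empty line after it.
--     """
--     lines = body.splitlines()
--     out: list[str] = []
--     i = 0
--     while i < len(lines):
--         line = lines[i]
--         if line.startswith("## "):
--             out.append(line)
--         elif line.startswith("### "):
--             out.append(line)
--             # find first non-empty line after the subheading
--             j = i + 1
--             while j < len(lines) and not lines[j].strip():
--                 j += 1
--             if j < len(lines) and not lines[j].startswith("#"):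
--                 out.append(lines[j].strip())
--         i += 1
--     return "\n".join(out)
-- ===== SOURCE B (Python) =====
-- def _summarize_inbox_section(body: str) -> str:
--     # Single state-machine pass: `pending` means a ### subheading awaits its
--     # first non-empty follow-up line; no inner look-ahead scan.
--     out = []
--     pending = False
--     for line in body.splitlines():
--         if line.startswith("## "):
--             out.append(line)
--             pending = False
--         elif line.startswith("### "):
--             out.append(line)
--             pending = True
--         elif pending and line.strip():
--             if not line.startswith("#"):
--                 out.append(line.strip())
--             pending = False
--     return "\n".join(out)
-- ===== Notes on version B (the rewrite author's own statement) =====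
-- stated objective: simpler
-- what changed: Replaced the index-based while-loop with a nested look-ahead scan for the first non-empty line after each subheading by a single linear pass carrying a boolean pending flag.
import Mathlib
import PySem

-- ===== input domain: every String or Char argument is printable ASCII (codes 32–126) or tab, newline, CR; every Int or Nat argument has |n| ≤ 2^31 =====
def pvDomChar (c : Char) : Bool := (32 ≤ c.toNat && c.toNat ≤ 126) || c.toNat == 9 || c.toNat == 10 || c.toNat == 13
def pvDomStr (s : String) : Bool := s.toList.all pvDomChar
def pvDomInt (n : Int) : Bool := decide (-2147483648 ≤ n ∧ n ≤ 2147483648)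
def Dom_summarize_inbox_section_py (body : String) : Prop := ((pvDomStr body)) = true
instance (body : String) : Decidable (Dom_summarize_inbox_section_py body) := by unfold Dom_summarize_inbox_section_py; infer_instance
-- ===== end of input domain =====

-- B replaces A's inner look-ahead scan after each "### " line by a single pass carrying a `pending` flag; objective: simpler.

-- ===== PORT A =====
-- inner while: advance j while lines[j].strip() is falsy
def pvAFind (lines : List String) (j : Nat) : Nat :=
  if h : j < lines.length then
    if PySem.Str.len (PySem.Str.strip lines[j]) == 0 then pvAFind lines (j + 1) else j
  else j
termination_by lines.length - j

-- outer while over index i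
def pvALoop (lines : List String) (i : Nat) (out : List String) : List String :=
  if h : i < lines.length then
    let line := lines[i]
    let out' :=
      if PySem.Str.startswith line "## " then out ++ [line]
      else if PySem.Str.startswith line "### " then
        let j := pvAFind lines (i + 1)
        if hj : j < lines.length then
          if PySem.Str.startswith lines[j] "#" then out ++ [line]
          else (out ++ [line]) ++ [PySem.Str.strip lines[j]]
        else out ++ [line]
      else out
    pvALoop lines (i + 1) out'
  else out
termination_by lines.length - i

def summarize_inbox_section_py (body : String) : String :=
  PySem.Str.join "\n" (pvALoop (PySem.Str.splitlines body) 0 [])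

-- ===== PORT B =====
-- one step of B's state machine; state = (out, pending)
def pvBStep (st : List String × Bool) (line : String) : List String × Bool :=
  if PySem.Str.startswith line "## " then (st.1 ++ [line], false)
  else if PySem.Str.startswith line "### " then (st.1 ++ [line], true)
  else if st.2 && !(PySem.Str.len (PySem.Str.strip line) == 0) then
    (if PySem.Str.startswith line "#" then st.1 else st.1 ++ [PySem.Str.strip line], false)
  else st

def summarize_inbox_section_py_alt (body : String) : String :=
  PySem.Str.join "\n" ((PySem.Str.splitlines body).foldl pvBStep ([], false)).1

-- ===== PRECONDITION & SPEC =====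
def Spec_summarize_inbox_section_py (body : String) (out : String) : Prop := out = summarize_inbox_section_py_alt body
instance (body : String) (out : String) : Decidable (Spec_summarize_inbox_section_py body out) := by unfold Spec_summarize_inbox_section_py; infer_instance

-- ===== CLAIM (what is proved, stated in full; the proofs are below) =====
def Claim_equal_summarize_inbox_section_py : Prop := ∀ (body : String), Dom_summarize_inbox_section_py body → Spec_summarize_inbox_section_py body (summarize_inbox_section_py body)

-- ===== LEMMAS AND PROOFS =====

-- what a pending "### " will contribute: the next non-blank line's strip, unless that line is a header
def pvExtra (xs : List String) : List String :=
  match xs with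
  | [] => []
  | l :: rest =>
    if PySem.Str.len (PySem.Str.strip l) == 0 then pvExtra rest
    else if PySem.Str.startswith l "#" then []
    else [PySem.Str.strip l]

-- structural restatement of A's outer loop (the bridge between the two ports)
def pvS (xs : List String) (acc : List String) : List String :=
  match xs with
  | [] => acc
  | l :: rest =>
    if PySem.Str.startswith l "## " then pvS rest (acc ++ [l])
    else if PySem.Str.startswith l "### " then pvS rest ((acc ++ [l]) ++ pvExtra rest)
    else pvS rest acc

-- a line starting with '#' has a non-empty strip()
lemma pv_hash_strip_ne (l : String) (h : PySem.Chars.startswith l.toList ['#'] = true) :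
    ¬ PySem.Chars.strip l.toList = [] := by
  rw [PySem.Chars.startswith_iff] at h
  obtain ⟨t, ht⟩ := h
  simp [PySem.Chars.strip, PySem.Chars.lstrip, PySem.Chars.rstrip, ← ht]
  exact ⟨'#', by simp [PySem.Chars.isspace], by simp [PySem.Chars.isspace]⟩

lemma pv_mono2 (l : String) (h : PySem.Chars.startswith l.toList ['#', '#', ' '] = true) :
    PySem.Chars.startswith l.toList ['#'] = true := by
  rw [PySem.Chars.startswith_iff] at h ⊢
  exact List.IsPrefix.trans ⟨['#', ' '], rfl⟩ h

lemma pv_mono3 (l : String) (h : PySem.Chars.startswith l.toList ['#', '#', '#', ' '] = true) :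
    PySem.Chars.startswith l.toList ['#'] = true := by
  rw [PySem.Chars.startswith_iff] at h ⊢
  exact List.IsPrefix.trans ⟨['#', '#', ' '], rfl⟩ h

-- B's fold equals the structural loop, for both values of the pending flag
lemma pv_fold_eq_S (xs : List String) : ∀ acc,
    (xs.foldl pvBStep (acc, false)).1 = pvS xs acc ∧
    (xs.foldl pvBStep (acc, true)).1 = pvS xs (acc ++ pvExtra xs) := by
  induction xs with
  | nil => intro acc; simp [pvS, pvExtra]
  | cons l rest ih =>
    intro acc
    by_cases h2 : PySem.Chars.startswith l.toList ['#', '#', ' '] = true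
    · have hash := pv_mono2 l h2
      have hb := pv_hash_strip_ne l hash
      refine ⟨?_, ?_⟩
      · simpa [pvBStep, h2, pvS] using (ih (acc ++ [l])).1
      · simpa [pvBStep, h2, pvS, pvExtra, hb, hash] using (ih (acc ++ [l])).1
    · by_cases h3 : PySem.Chars.startswith l.toList ['#', '#', '#', ' '] = true
      · have hash := pv_mono3 l h3
        have hb := pv_hash_strip_ne l hash
        refine ⟨?_, ?_⟩
        · simpa [pvBStep, h2, h3, pvS] using (ih (acc ++ [l])).2
        · simpa [pvBStep, h2, h3, pvS, pvExtra, hb, hash] using (ih (acc ++ [l])).2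
      · by_cases hE : PySem.Chars.strip l.toList = []
        · refine ⟨?_, ?_⟩
          · simpa [pvBStep, h2, h3, hE, pvS] using (ih acc).1
          · simpa [pvBStep, h2, h3, hE, pvS, pvExtra] using (ih acc).2
        · refine ⟨?_, ?_⟩
          · simpa [pvBStep, h2, h3, hE, pvS] using (ih acc).1
          · by_cases hash : PySem.Chars.startswith l.toList ['#'] = true
            · simpa [pvBStep, h2, h3, hE, hash, pvS, pvExtra] using (ih acc).1
            · simpa [pvBStep, h2, h3, hE, hash, pvS, pvExtra] using (ih (acc ++ [PySem.Str.strip l])).1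

-- A's inner scan computes pvExtra of the remaining suffix
lemma pv_find_extra (lines : List String) : ∀ n j, lines.length - j ≤ n →
    pvExtra (lines.drop j) =
      (if hj : pvAFind lines j < lines.length then
        (if PySem.Str.startswith lines[pvAFind lines j] "#" then ([] : List String)
         else [PySem.Str.strip lines[pvAFind lines j]])
       else []) := by
  intro n
  induction n with
  | zero =>
    intro j hn
    have hj : lines.length ≤ j := by omega
    rw [pvAFind]
    simp [List.drop_eq_nil_of_le hj, pvExtra, Nat.not_lt.mpr hj]
  | succ n ih =>
    intro j hn
    by_cases h : j < lines.length
    · have hd : lines.drop j = lines[j] :: lines.drop (j + 1) := List.drop_eq_getElem_cons h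
      by_cases hE : PySem.Chars.strip lines[j].toList = []
      · rw [hd, show pvExtra (lines[j] :: lines.drop (j+1)) = pvExtra (lines.drop (j+1)) by
          simp [pvExtra, hE]]
        rw [show pvAFind lines j = pvAFind lines (j+1) by rw [pvAFind]; simp [h, hE]]
        exact ih (j+1) (by omega)
      · rw [hd, show pvAFind lines j = j by rw [pvAFind]; simp [h, hE]]
        simp [pvExtra, hE, h]
    · have hj : lines.length ≤ j := by omega
      rw [pvAFind]
      simp [List.drop_eq_nil_of_le hj, pvExtra, Nat.not_lt.mpr hj]

-- A's index loop equals the structural loop on the dropped suffix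
lemma pv_aloop_eq_S (lines : List String) : ∀ n i acc, lines.length - i ≤ n →
    pvALoop lines i acc = pvS (lines.drop i) acc := by
  intro n
  induction n with
  | zero =>
    intro i acc hn
    have hi : lines.length ≤ i := by omega
    rw [pvALoop]
    simp [List.drop_eq_nil_of_le hi, pvS, Nat.not_lt.mpr hi]
  | succ n ih =>
    intro i acc hn
    by_cases h : i < lines.length
    · have hd : lines.drop i = lines[i] :: lines.drop (i + 1) := List.drop_eq_getElem_cons h
      have hfe := pv_find_extra lines (lines.length - (i+1)) (i+1) le_rfl
      rw [pvALoop, hd]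
      simp only [h, dif_pos]
      rw [ih (i+1) _ (by omega)]
      by_cases h2 : PySem.Chars.startswith lines[i].toList ['#', '#', ' '] = true
      · simp [pvS, h2]
      · by_cases h3 : PySem.Chars.startswith lines[i].toList ['#', '#', '#', ' '] = true
        · simp [pvS, h2, h3]
          simp only [PySem.Str.startswith_eq, show ("#" : String).toList = ['#'] from rfl] at hfe
          rw [hfe]
          congr 1
          split_ifs <;> simp
        · simp [pvS, h2, h3]
    · have hi : lines.length ≤ i := by omega
      rw [pvALoop]
      simp [List.drop_eq_nil_of_le hi, pvS, Nat.not_lt.mpr hi]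

-- ===== VERDICT (by name: the statement is the Claim_ definition above) =====
theorem summarize_inbox_section_py_spec : Claim_equal_summarize_inbox_section_py := by
  intro body _
  unfold Spec_summarize_inbox_section_py summarize_inbox_section_py summarize_inbox_section_py_alt
  rw [pv_aloop_eq_S _ (PySem.Str.splitlines body).length 0 [] (by omega), List.drop_zero,
      (pv_fold_eq_S _ []).1]
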